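-- pv_equiv track=rewrite | github.com/pressi1337/health-care-api | app.py | predict_conditions_disease
-- ===== SOURCE A (Python) =====
-- def predict_conditions_disease(disease_data, payload):
--     matched_diseases = {}
--
--     # Iterate over each disease in the dataset
--     for disease, symptoms in disease_data.items():
--         match_count = 0
--
--         # Count how many symptoms match the payload
--         for symptom in symptoms:
--             if symptom in payload and payload[symptom] == 1:
--                 match_count += 1
--
--         # If there are matching symptoms, add to the results
--         if match_count > 0:
--             matched_diseases[disease] = match_count
--
--     # Sort diseases by the number of matching symptoms (descending)
--     sorted_diseases = sorted(matched_diseases.items(), key=lambda x: x[1], reverse=True)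
--
--     # Return the predicted disease or "No disease"
--     if sorted_diseases:
--         return {"predicted_disease": sorted_diseases[0][0]}
--     else:
--         return {"predicted_disease": "no_chronic_diseases"}
-- ===== SOURCE B (Python) =====
-- def predict_conditions_disease(disease_data, payload):
--     # set of symptoms reported positive
--     present = {s for s, v in payload.items() if v == 1}
--     # score every disease, then take the first maximum; 0 means no match
--     scored = [(d, sum(s in present for s in syms)) for d, syms in disease_data.items()]
--     best_disease, best_count = max(scored, key=lambda t: t[1], default=("no_chronic_diseases", 0))
--     if best_count <= 0:
--         best_disease = "no_chronic_diseases"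
--     return {"predicted_disease": best_disease}
-- ===== Notes on version B (the rewrite author's own statement) =====
-- stated objective: simpler
-- what changed: B precomputes a set of positive symptoms, scores every disease with a membership-count comprehension, and takes the first maximum with max(key=...,default=...) plus a zero-score fallback, instead of A's conditional matched-diseases dict followed by a full descending sort.
import Mathlib
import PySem

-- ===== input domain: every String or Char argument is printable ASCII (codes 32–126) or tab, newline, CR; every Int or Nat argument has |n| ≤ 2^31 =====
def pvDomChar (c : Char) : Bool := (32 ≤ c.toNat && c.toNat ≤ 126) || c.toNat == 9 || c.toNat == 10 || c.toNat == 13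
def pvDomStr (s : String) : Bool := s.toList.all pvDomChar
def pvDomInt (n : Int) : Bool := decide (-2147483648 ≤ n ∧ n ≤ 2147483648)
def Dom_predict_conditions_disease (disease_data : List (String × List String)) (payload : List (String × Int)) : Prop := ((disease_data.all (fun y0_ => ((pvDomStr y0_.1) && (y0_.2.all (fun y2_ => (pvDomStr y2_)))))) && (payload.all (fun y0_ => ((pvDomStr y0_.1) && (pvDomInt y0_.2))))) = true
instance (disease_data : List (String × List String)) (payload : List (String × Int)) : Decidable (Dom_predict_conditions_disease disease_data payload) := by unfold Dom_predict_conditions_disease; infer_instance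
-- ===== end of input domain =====

-- B scores every disease against a precomputed set of positive symptoms and takes the first
-- maximum with a zero-score fallback, instead of A's matched-diseases dict plus descending sort;
-- return values only, no mutation.

-- ===== PORT A =====
-- Both parameters are Python dicts; PySem.Dict.ofList gives their dict view (last duplicate wins).
-- the inner 'for symptom in symptoms' counting loop of A
def pvMatchCount (pd : PySem.Dict String Int) (symptoms : List String) : Int :=
  symptoms.foldl (fun c symptom =>
    if pd.contains symptom = true ∧ pd.get? symptom = some 1 then c + 1 else c) 0

-- the body of A's 'for disease, symptoms in disease_data.items()' loop
def pvAstepA (pd : PySem.Dict String Int) (md : PySem.Dict String Int) (p : String × List String) : PySem.Dict String Int :=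
  let match_count := pvMatchCount pd p.2
  if match_count > 0 then md.insert p.1 match_count else md

def predict_conditions_disease (disease_data : List (String × List String)) (payload : List (String × Int)) : List (String × String) :=
  let pd := PySem.Dict.ofList payload
  let matched := (PySem.Dict.ofList disease_data).items.foldl (pvAstepA pd) PySem.Dict.empty
  let sorted_diseases := PySem.List.sorted matched.items (fun x => x.2) true
  match sorted_diseases with
  | [] => [("predicted_disease", "no_chronic_diseases")]
  | x :: _ => [("predicted_disease", x.1)]

-- ===== PORT B =====
-- present = {s for s, v in payload.items() if v == 1}
def pvPresent (payload : List (String × Int)) : PySem.Set String :=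
  PySem.Set.ofList (((PySem.Dict.ofList payload).items.filter (fun p => p.2 == 1)).map (fun p => p.1))

-- sum(s in present for s in syms)
def pvScore (present : PySem.Set String) (syms : List String) : Int :=
  (syms.countP (fun s => PySem.Set.contains present s) : Int)

def predict_conditions_disease_alt (disease_data : List (String × List String)) (payload : List (String × Int)) : List (String × String) :=
  let present := pvPresent payload
  let scored := (PySem.Dict.ofList disease_data).items.map (fun p => (p.1, pvScore present p.2))
  let best := PySem.List.maxD scored (fun t => t.2) ("no_chronic_diseases", 0)
  [("predicted_disease", if best.2 ≤ 0 then "no_chronic_diseases" else best.1)]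

-- ===== PRECONDITION & SPEC =====
def Spec_predict_conditions_disease (disease_data : List (String × List String)) (payload : List (String × Int)) (out : List (String × String)) : Prop := out = predict_conditions_disease_alt disease_data payload
instance (disease_data : List (String × List String)) (payload : List (String × Int)) (out : List (String × String)) : Decidable (Spec_predict_conditions_disease disease_data payload out) := by unfold Spec_predict_conditions_disease; infer_instance

-- ===== CLAIM (what is proved, stated in full; the proofs are below) =====
def Claim_equal_predict_conditions_disease : Prop := ∀ (disease_data : List (String × List String)) (payload : List (String × Int)), Dom_predict_conditions_disease disease_data payload → Spec_predict_conditions_disease disease_data payload (predict_conditions_disease disease_data payload)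

-- ===== LEMMAS AND PROOFS =====

-- membership in B's positive-symptom set is exactly "payload maps s to 1"
theorem pvPresent_contains (payload : List (String × Int)) (s : String) :
    PySem.Set.contains (pvPresent payload) s = true ↔
    (PySem.Dict.ofList payload).get? s = some 1 := by
  rw [PySem.Set.contains_iff]
  unfold pvPresent
  rw [PySem.Set.mem_ofList,
    PySem.Dict.get?_eq_some_iff_mem_items _ _ _ (PySem.Dict.nodup_keys_ofList payload)]
  constructor
  · intro h
    obtain ⟨p, hp, rfl⟩ := List.mem_map.mp h
    have := List.mem_filter.mp hp
    have hv : p.2 = 1 := by simpa using this.2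
    exact hv ▸ this.1
  · intro h
    exact List.mem_map_of_mem (List.mem_filter.mpr ⟨h, by simp⟩)

-- A's counting loop computes B's score
theorem pvMatchCount_eq_score (payload : List (String × Int)) (syms : List String) :
    pvMatchCount (PySem.Dict.ofList payload) syms = pvScore (pvPresent payload) syms := by
  unfold pvMatchCount pvScore
  rw [PySem.List.foldl_ite_add_one]
  rw [List.countP_congr (fun s _ => ?_), zero_add]
  by_cases h : (PySem.Dict.ofList payload).get? s = some 1
  · have hc : (PySem.Dict.ofList payload).contains s = true := by
      rw [PySem.Dict.contains_eq_isSome_get?, h]; rfl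
    have hm : s ∈ pvPresent payload :=
      (PySem.Set.contains_iff _ _).mp ((pvPresent_contains payload s).mpr h)
    simp [h, hc, hm]
  · have hm : s ∉ pvPresent payload :=
      fun hmem => h ((pvPresent_contains payload s).mp ((PySem.Set.contains_iff _ _).mpr hmem))
    simp [h, hm]

-- B's running-best step over (disease, score) pairs (what max? folds)
def pvStep (b : String × Int) (x : String × Int) : String × Int :=
  if b.2 < x.2 then x else b

-- the second component never decreases along the fold
theorem pvStep_snd_le : ∀ (t : List (String × Int)) (b : String × Int),
    b.2 ≤ (t.foldl pvStep b).2 := by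
  intro t
  induction t with
  | nil => intro b; exact le_refl _
  | cons y t ih =>
    intro b
    refine le_trans ?_ (ih (pvStep b y))
    unfold pvStep
    split_ifs with h
    · exact le_of_lt h
    · exact le_refl _

-- non-positive entries never win against a non-negative accumulator: the filter may be dropped
theorem pvFoldl_filter_pos : ∀ (M : List (String × Int)) (b : String × Int), 0 ≤ b.2 →
    (M.filter (fun q => decide (0 < q.2))).foldl pvStep b = M.foldl pvStep b := by
  intro M
  induction M with
  | nil => intro b _; rfl
  | cons y t ih =>
    intro b hb
    rw [List.filter_cons]
    by_cases h : 0 < y.2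
    · simp only [h, decide_true, if_true, List.foldl_cons]
      refine ih _ ?_
      unfold pvStep; split_ifs with h' <;> [exact le_of_lt h; exact hb]
    · have hstep : pvStep b y = b := by
        unfold pvStep; rw [if_neg (by omega)]
      simp only [h, decide_false, Bool.false_eq_true, if_false, List.foldl_cons, hstep]
      exact ih _ hb

-- one comparison step of max? folds into pvStep
theorem pvMax?_cons_cons (x y : String × Int) (t : List (String × Int)) :
    PySem.List.max? (x :: y :: t) (fun q => q.2)
    = PySem.List.max? (pvStep x y :: t) (fun q => q.2) := by
  unfold PySem.List.max?
  simp only [List.foldl_cons]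
  congr 1
  show (if x.2 < y.2 then some y else some x) = some (pvStep x y)
  unfold pvStep
  split_ifs <;> rfl

-- max? with key (·.2) is the pvStep fold from the head
theorem pvMaxAux : ∀ (t : List (String × Int)) (x : String × Int),
    PySem.List.max? (x :: t) (fun q => q.2) = some (t.foldl pvStep x) := by
  intro t
  induction t with
  | nil => intro x; rfl
  | cons y t ih =>
    intro x
    rw [pvMax?_cons_cons, ih, List.foldl_cons]

-- with a non-positive start, B's guarded best equals the fold started at ("no_chronic_diseases", 0)
theorem pvGuard_eq : ∀ (t : List (String × Int)) (b : String × Int), b.2 ≤ 0 →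
    (if (t.foldl pvStep b).2 ≤ 0 then "no_chronic_diseases" else (t.foldl pvStep b).1)
    = (t.foldl pvStep ("no_chronic_diseases", 0)).1 := by
  intro t
  induction t with
  | nil =>
    intro b hb
    simp only [List.foldl_nil]
    rw [if_pos hb]
  | cons y t ih =>
    intro b hb
    simp only [List.foldl_cons]
    by_cases h : 0 < y.2
    · have h1 : pvStep b y = y := by unfold pvStep; rw [if_pos (by omega)]
      have h2 : pvStep ("no_chronic_diseases", 0) y = y := by
        unfold pvStep; rw [if_pos (by simpa using h)]
      rw [h1, h2, if_neg (by have := pvStep_snd_le t y; omega)]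
    · have h2 : pvStep ("no_chronic_diseases", 0) y = ("no_chronic_diseases", 0) := by
        unfold pvStep; rw [if_neg (by simpa using h)]
      have hby : (pvStep b y).2 ≤ 0 := by
        unfold pvStep; split_ifs <;> omega
      rw [h2, ← ih (pvStep b y) hby]

-- unfolding one step of PySem's insertion
theorem pvInsertBy_cons {α : Type} (bf : α → α → Bool) (z x : α) (ys : List α) :
    PySem.List.insertBy bf z (x :: ys)
    = if bf z x then z :: x :: ys else x :: PySem.List.insertBy bf z ys := rfl

-- the head of the stable descending insertion sort is the running maximum (first winner)
theorem pvSorted_head :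
    ∀ (l : List (String × Int)) (x : String × Int) (ys : List (String × Int)),
    ∃ r, l.foldl (fun acc z => PySem.List.insertBy (fun a b => decide (b.2 < a.2)) z acc) (x :: ys)
      = (l.foldl pvStep x) :: r := by
  intro l
  induction l with
  | nil => intro x ys; exact ⟨ys, rfl⟩
  | cons z t ih =>
    intro x ys
    simp only [List.foldl_cons, pvInsertBy_cons]
    by_cases h : x.2 < z.2
    · simp only [h, decide_true, if_true]
      obtain ⟨r, hr⟩ := ih z (x :: ys)
      refine ⟨r, ?_⟩
      rw [hr, show pvStep x z = z from by simp [pvStep, h]]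
    · simp only [h, decide_false, Bool.false_eq_true, if_false]
      obtain ⟨r, hr⟩ := ih x (PySem.List.insertBy (fun a b => decide (b.2 < a.2)) z ys)
      refine ⟨r, ?_⟩
      rw [hr, show pvStep x z = x from by simp [pvStep, h]]

-- picking the first of the descending sort = the running-best fold, on positive entries
theorem pvFinal (M : List (String × Int)) (hpos : ∀ q ∈ M, 0 < q.2) :
    (match PySem.List.sorted M (fun x => x.2) true with
     | [] => [(("predicted_disease" : String), ("no_chronic_diseases" : String))]
     | x :: _ => [(("predicted_disease" : String), x.1)])
    = [(("predicted_disease" : String), (M.foldl pvStep ("no_chronic_diseases", 0)).1)] := by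
  match M with
  | [] => rfl
  | x :: t =>
    have hx : 0 < x.2 := hpos x List.mem_cons_self
    rw [PySem.List.sorted_rev_eq_foldl_insertBy]
    simp only [List.foldl_cons]
    rw [show PySem.List.insertBy (fun a b : String × Int => decide (b.2 < a.2)) x [] = [x] from rfl]
    obtain ⟨r, hr⟩ := pvSorted_head t x []
    rw [hr]
    rw [show pvStep (("no_chronic_diseases" : String), (0 : Int)) x = x from by simp [pvStep, hx]]

-- B's guarded first-maximum is A's running-best fold started at the fallback
theorem pvMaxD_guard (M : List (String × Int)) :
    [(("predicted_disease" : String), (M.foldl pvStep ("no_chronic_diseases", 0)).1)]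
    = [(("predicted_disease" : String),
        if (PySem.List.maxD M (fun t => t.2) ("no_chronic_diseases", 0)).2 ≤ 0
        then "no_chronic_diseases"
        else (PySem.List.maxD M (fun t => t.2) ("no_chronic_diseases", 0)).1)] := by
  unfold PySem.List.maxD
  match M with
  | [] => rfl
  | x :: t =>
    rw [pvMaxAux t x, Option.getD_some]
    simp only [List.foldl_cons]
    by_cases hx : 0 < x.2
    · have h1 : pvStep ("no_chronic_diseases", 0) x = x := by
        unfold pvStep; rw [if_pos (by simpa using hx)]
      rw [h1, if_neg (by have := pvStep_snd_le t x; omega)]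
    · have h1 : pvStep ("no_chronic_diseases", 0) x = ("no_chronic_diseases", 0) := by
        unfold pvStep; rw [if_neg (by simpa using hx)]
      rw [h1, pvGuard_eq t x (by omega)]

-- ===== VERDICT (by name: the statement is the Claim_ definition above) =====
theorem predict_conditions_disease_spec : Claim_equal_predict_conditions_disease := by
  intro disease_data payload _
  unfold Spec_predict_conditions_disease predict_conditions_disease predict_conditions_disease_alt
  simp only
  set pd := PySem.Dict.ofList payload with hpd
  set L := (PySem.Dict.ofList disease_data).items with hL
  -- rewrite A's loop as a fold over the positives, then its items as a map
  have hbody : L.foldl (pvAstepA pd) PySem.Dict.empty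
      = (L.filter (fun p => decide (0 < pvScore (pvPresent payload) p.2))).foldl
          (fun md p => md.insert p.1 (pvScore (pvPresent payload) p.2)) PySem.Dict.empty := by
    rw [← PySem.List.foldl_ite_eq_foldl_filter]
    apply PySem.List.foldl_congr_mem
    intro md p _
    show pvAstepA pd md p = _
    unfold pvAstepA
    rw [hpd, pvMatchCount_eq_score payload p.2]
  have hnodupL : (L.map (fun p => p.1)).Nodup := by
    have := PySem.Dict.nodup_keys_ofList (κ := String) (ν := List String) disease_data
    simpa [PySem.Dict.keys, hL] using this
  have hnodupF : ((L.filter (fun p => decide (0 < pvScore (pvPresent payload) p.2))).map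
      (fun p => p.1)).Nodup :=
    hnodupL.sublist (List.Sublist.map _ List.filter_sublist)
  have hitems : (L.foldl (pvAstepA pd) PySem.Dict.empty).items
      = (L.filter (fun p => decide (0 < pvScore (pvPresent payload) p.2))).map
          (fun p => (p.1, pvScore (pvPresent payload) p.2)) := by
    rw [hbody, PySem.Dict.items_foldl_insert_fresh _ _ _ _
      (fun a _ => PySem.Dict.contains_empty _) hnodupF]
    rfl
  rw [hitems]
  -- A's filtered map is the filter of B's scored list
  have hMpos : (L.filter (fun p => decide (0 < pvScore (pvPresent payload) p.2))).map
        (fun p => (p.1, pvScore (pvPresent payload) p.2))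
      = (L.map (fun p => (p.1, pvScore (pvPresent payload) p.2))).filter
          (fun q => decide (0 < q.2)) := by
    rw [List.filter_map]
    rfl
  rw [hMpos]
  set M := L.map (fun p => (p.1, pvScore (pvPresent payload) p.2)) with hM
  -- A's side collapses to the running-best fold over all of M
  rw [pvFinal _ (fun q hq => by simpa using List.of_mem_filter hq)]
  rw [pvFoldl_filter_pos M ("no_chronic_diseases", 0) (by norm_num)]
  rw [pvMaxD_guard M]
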